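-- pv_equiv track=rewrite | github.com/Darth-Hidious/PRISM | app/tools/bash.py | _collect_positionals
-- ===== SOURCE A (Python) =====
-- from typing import Any, Iterable, Sequence
--
-- def _collect_positionals(args: Sequence[str], flags_with_values: Iterable[str] = ()) -> list[str]:
--     needs_value = set(flags_with_values)
--     positionals: list[str] = []
--     after_double_dash = False
--     skip_next = False
--     for token in args:
--         if skip_next:
--             skip_next = False
--             continue
--         if after_double_dash:
--             positionals.append(token)
--             continue
--         if token == "--":
--             after_double_dash = True
--             continue
--         if token.startswith("-") and token != "-":
--             flag = token.split("=", 1)[0]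
--             if flag in needs_value and "=" not in token:
--                 skip_next = True
--             continue
--         positionals.append(token)
--     return positionals
-- ===== SOURCE B (Python) =====
-- from typing import Iterable, Sequence
--
-- def _collect_positionals(args: Sequence[str], flags_with_values: Iterable[str] = ()) -> list[str]:
--     needs_value = set(flags_with_values)
--
--     def flaglike(t: str) -> bool:
--         return t.startswith("-") and t != "-"
--
--     def takes_value(t: str) -> bool:
--         return flaglike(t) and "=" not in t and t in needs_value
--
--     # Pass 1: mark which tokens are consumed as a preceding flag's value,
--     # by the recurrence consumed[i] = takes_value(args[i-1]) and not consumed[i-1].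
--     consumed = [False] * len(args)
--     for i in range(1, len(args)):
--         consumed[i] = takes_value(args[i - 1]) and not consumed[i - 1]
--     # Pass 2: the literal-tail separator is the first unconsumed "--".
--     cut = next((i for i, (t, c) in enumerate(zip(args, consumed)) if t == "--" and not c),
--                len(args))
--     # Pass 3: keep unconsumed non-flag tokens before the cut, everything after it.
--     head = [t for t, c in zip(args[:cut], consumed) if not c and not flaglike(t)]
--     return head + list(args[cut + 1:])
-- ===== Notes on version B (the rewrite author's own statement) =====
-- stated objective: alternative
-- what changed: Replaced A's online state machine (after_double_dash/skip_next booleans mutated inside one for-loop) by three staged passes: first compute a consumed-value boolean mask via the recurrence consumed[i] = takes_value(args[i-1]) and not consumed[i-1], then locate the first unconsumed '--' as the literal-tail cut, then filter positionals by comprehension and append the tail in bulk.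
import Mathlib
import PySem

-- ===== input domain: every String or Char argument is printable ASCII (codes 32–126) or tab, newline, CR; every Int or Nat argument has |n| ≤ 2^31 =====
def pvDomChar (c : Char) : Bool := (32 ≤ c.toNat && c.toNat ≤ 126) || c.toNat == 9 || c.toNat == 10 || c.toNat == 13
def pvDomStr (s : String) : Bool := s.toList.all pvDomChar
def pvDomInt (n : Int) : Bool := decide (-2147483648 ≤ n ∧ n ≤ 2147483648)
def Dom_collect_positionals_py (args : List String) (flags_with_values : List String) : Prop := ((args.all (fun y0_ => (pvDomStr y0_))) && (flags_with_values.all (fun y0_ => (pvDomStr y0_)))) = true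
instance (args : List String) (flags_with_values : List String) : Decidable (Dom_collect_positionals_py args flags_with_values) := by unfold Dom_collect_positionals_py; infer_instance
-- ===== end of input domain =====

-- B replaces A's online state machine by three staged passes: a consumed-value boolean mask
-- computed by a recurrence, then the first unconsumed '--', then a filter plus a bulk tail.


-- ===== PORT A =====
-- one iteration of A's for-loop; state = (positionals, after_double_dash, skip_next)
def pvStepA (needs : PySem.Set String) (st : List String × Bool × Bool) (token : String) : List String × Bool × Bool :=
  if st.2.2 then (st.1, st.2.1, false)
  else if st.2.1 then (st.1 ++ [token], st.2.1, st.2.2)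
  else if token == "--" then (st.1, true, st.2.2)
  else if PySem.Str.startswith token "-" && token != "-" then
    let flag := ((PySem.Str.splitMax? token "=" 1).getD []).headD ""
    if needs.contains flag && !(PySem.Str.isIn "=" token) then (st.1, st.2.1, true)
    else st
  else (st.1 ++ [token], st.2.1, st.2.2)

def collect_positionals_py (args : List String) (flags_with_values : List String) : List String :=
  let needs : PySem.Set String := PySem.Set.ofList flags_with_values
  (List.foldl (pvStepA needs) ([], false, false) args).1

-- ===== PORT B =====
def pvFlaglike (t : String) : Bool := PySem.Str.startswith t "-" && t != "-"

def pvTakesValue (needs : PySem.Set String) (t : String) : Bool :=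
  pvFlaglike t && !(PySem.Str.isIn "=" t) && needs.contains t

-- pass 1 of Source B: the consumed-value mask, consumed[i] = takes_value(args[i-1]) && !consumed[i-1]
def pvConsumed (needs : PySem.Set String) : List String → Bool → List Bool
  | [], _ => []
  | t :: rest, c => c :: pvConsumed needs rest (pvTakesValue needs t && !c)

def collect_positionals_py_alt (args : List String) (flags_with_values : List String) : List String :=
  let needs : PySem.Set String := PySem.Set.ofList flags_with_values
  let consumed := pvConsumed needs args false
  let pairs := args.zip consumed
  let cut := ((pairs.findIdx? (fun p => p.1 == "--" && !p.2)).getD args.length)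
  ((pairs.take cut).filter (fun p => !p.2 && !pvFlaglike p.1)).map Prod.fst ++ args.drop (cut + 1)

-- ===== PRECONDITION & SPEC =====
def Spec_collect_positionals_py (args : List String) (flags_with_values : List String) (out : List String) : Prop := out = collect_positionals_py_alt args flags_with_values
instance (args : List String) (flags_with_values : List String) (out : List String) : Decidable (Spec_collect_positionals_py args flags_with_values out) := by unfold Spec_collect_positionals_py; infer_instance

-- ===== CLAIM (what is proved, stated in full; the proofs are below) =====
def Claim_equal_collect_positionals_py : Prop := ∀ (args : List String) (flags_with_values : List String), Dom_collect_positionals_py args flags_with_values → Spec_collect_positionals_py args flags_with_values (collect_positionals_py args flags_with_values)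

-- ===== LEMMAS AND PROOFS =====

-- intermediate specification: a one-pass recursion both ports are proved equal to
def pvScanB (needs : PySem.Set String) : List String → List String
  | [] => []
  | token :: rest =>
    if token == "--" then rest
    else if pvFlaglike token then
      if !(PySem.Str.isIn "=" token) && needs.contains token then pvScanB needs (rest.drop 1)
      else pvScanB needs rest
    else token :: pvScanB needs rest
termination_by l => l.length
decreasing_by
  all_goals simp

-- ---- A = pvScanB ----

-- splitOnMax finds no separator: the whole rest is the (only remaining) piece
lemma pv_go_no_sep : ∀ (fuel m : Nat) (l cur : List Char) (acc : List (List Char)),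
    l.length < fuel → ¬ (['='] <:+: l) →
    PySem.Chars.splitOnMax.go ['='] fuel m l cur acc = ((cur.reverse ++ l) :: acc).reverse := by
  intro fuel
  induction fuel with
  | zero => intro m l cur acc h _; exact absurd h (Nat.not_lt_zero _)
  | succ fuel ih =>
    intro m l cur acc h hsep
    cases l with
    | nil => simp [PySem.Chars.splitOnMax.go]
    | cons c rest =>
      by_cases hm : m = 0
      · simp [PySem.Chars.splitOnMax.go, hm]
      · have hpre : ['='].isPrefixOf (c :: rest) = false := by
          simp only [Bool.eq_false_iff, ne_eq, List.isPrefixOf_iff_prefix]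
          exact fun hp => hsep hp.isInfix
        have hsep' : ¬ (['='] <:+: rest) :=
          fun hi => hsep (hi.trans (List.suffix_cons c rest).isInfix)
        rw [PySem.Chars.splitOnMax.go]
        simp only [hm, if_false, hpre, Bool.false_eq_true, if_false]
        rw [ih m rest (c :: cur) acc (by simp at h ⊢; omega) hsep']
        simp

-- token.split("=", 1)[0] is the token itself when it contains no '='
lemma pv_flag_self (t : String) (h : PySem.Str.isIn "=" t = false) :
    ((PySem.Str.splitMax? t "=" 1).getD []).head?.getD "" = t := by
  have h' : PySem.Chars.isIn ['='] t.toList = false := by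
    rw [PySem.Str.isIn_eq] at h; exact h
  have hinf : ¬ (['='] <:+: t.toList) := (PySem.Chars.isIn_eq_false_iff _ _).mp h'
  have hsep : ("=" : String).toList = ['='] := rfl
  simp only [PySem.Str.splitMax?, PySem.Chars.splitMax?, PySem.Chars.splitOnMax, hsep]
  rw [if_neg (by decide), if_neg (by norm_num)]
  rw [pv_go_no_sep _ _ _ _ _ (by omega) hinf]
  simp

-- once after_double_dash is set, A appends every remaining token
lemma pv_tail (needs : PySem.Set String) : ∀ (rest pos : List String),
    (List.foldl (pvStepA needs) (pos, true, false) rest).1 = pos ++ rest := by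
  intro rest
  induction rest with
  | nil => simp
  | cons t r ih =>
    intro pos
    rw [List.foldl_cons]
    have : pvStepA needs (pos, true, false) t = (pos ++ [t], true, false) := by
      simp [pvStepA]
    rw [this, ih]
    simp

-- main invariant for A: the fold from a clean state computes pos ++ the one-pass scan of the tail
lemma pv_main_A (needs : PySem.Set String) : ∀ (n : Nat) (rest : List String), rest.length ≤ n →
    ∀ (pos : List String),
    (List.foldl (pvStepA needs) (pos, false, false) rest).1 = pos ++ pvScanB needs rest := by
  intro n
  induction n with
  | zero =>
    intro rest h pos
    have : rest = [] := List.eq_nil_of_length_eq_zero (Nat.le_zero.mp h)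
    subst this; simp [pvScanB]
  | succ n ih =>
    intro rest h pos
    cases rest with
    | nil => simp [pvScanB]
    | cons t r =>
      rw [List.foldl_cons]
      by_cases hdd : t = "--"
      · subst hdd
        have hA : pvStepA needs (pos, false, false) "--" = (pos, true, false) := by
          simp [pvStepA]
        rw [hA, pv_tail, pvScanB]
        simp
      · by_cases hs : PySem.Chars.startswith t.toList ['-'] = true
        · by_cases hne : t = "-"
          · subst hne
            have hA : pvStepA needs (pos, false, false) "-" = (pos ++ ["-"], false, false) := by
              simp [pvStepA]
            rw [hA, ih r (by simp at h; omega) (pos ++ ["-"]), pvScanB]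
            simp [pvFlaglike]
          · by_cases hin : PySem.Chars.isIn ['='] t.toList = false
            · have hstr : PySem.Str.isIn "=" t = false := by
                rw [PySem.Str.isIn_eq]; exact hin
              by_cases hc : t ∈ needs
              · have hA : pvStepA needs (pos, false, false) t = (pos, false, true) := by
                  simp [pvStepA, hdd, hs, hne, hin, hc, pv_flag_self t hstr]
                rw [hA]
                cases r with
                | nil => simp [pvScanB, hdd, hs, hne, hin, hc, pvFlaglike, PySem.Str.startswith]
                | cons u r' =>
                  rw [List.foldl_cons]
                  have hB : pvStepA needs (pos, false, true) u = (pos, false, false) := by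
                    simp [pvStepA]
                  rw [hB, ih r' (by simp at h; omega) pos, pvScanB]
                  simp [hdd, hs, hne, hin, hc, pvFlaglike, PySem.Str.startswith]
              · have hA : pvStepA needs (pos, false, false) t = (pos, false, false) := by
                  simp [pvStepA, hdd, hs, hne, hin, hc, pv_flag_self t hstr]
                rw [hA, ih r (by simp at h; omega) pos, pvScanB]
                simp [hdd, hs, hne, hin, hc, pvFlaglike, PySem.Str.startswith]
            · have hA : pvStepA needs (pos, false, false) t = (pos, false, false) := by
                simp [pvStepA, hdd, hs, hne, hin]
              rw [hA, ih r (by simp at h; omega) pos, pvScanB]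
              simp [hdd, hs, hne, hin, pvFlaglike, PySem.Str.startswith]
        · have hA : pvStepA needs (pos, false, false) t = (pos ++ [t], false, false) := by
            simp [pvStepA, hdd, hs]
          rw [hA, ih r (by simp at h; omega) (pos ++ [t]), pvScanB]
          simp [hdd, hs, pvFlaglike, PySem.Str.startswith]

-- ---- B = pvScanB ----

-- B's staged body, generalized over an arbitrary mask list (pvG args (pvConsumed … false) = B's body)
def pvG (args : List String) (consumed : List Bool) : List String :=
  let pairs := args.zip consumed
  let cut := ((pairs.findIdx? (fun p => p.1 == "--" && !p.2)).getD args.length)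
  ((pairs.take cut).filter (fun p => !p.2 && !pvFlaglike p.1)).map Prod.fst ++ args.drop (cut + 1)

lemma pvG_nil (C : List Bool) : pvG [] C = [] := by
  simp [pvG]

lemma pvG_cons_sep (t : String) (rest : List String) (c : Bool) (C : List Bool)
    (h : (t == "--" && !c) = true) : pvG (t :: rest) (c :: C) = rest := by
  simp [pvG, List.findIdx?_cons, h]

lemma pvG_cons (t : String) (rest : List String) (c : Bool) (C : List Bool)
    (h : (t == "--" && !c) = false) :
    pvG (t :: rest) (c :: C) =
      (if (!c && !pvFlaglike t) = true then [t] else []) ++ pvG rest C := by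
  unfold pvG
  simp only [List.zip_cons_cons, List.findIdx?_cons, h, Bool.false_eq_true, if_false]
  cases hf : (rest.zip C).findIdx? (fun p => p.1 == "--" && !p.2) with
  | none =>
    have hlen : (rest.zip C).length ≤ rest.length := by
      simp [List.length_zip]
    simp only [Option.map_none, Option.getD_none, List.length_cons]
    rw [List.take_succ_cons, List.take_of_length_le hlen, List.drop_succ_cons,
        List.drop_eq_nil_of_le (Nat.le_succ _)]
    cases hk : (!c && !pvFlaglike t) <;> simp [hk]
  | some k =>
    simp only [Option.map_some, Option.getD_some]
    rw [List.take_succ_cons, List.drop_succ_cons]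
    cases hk : (!c && !pvFlaglike t) <;> simp [hk]

-- main invariant for B: the staged computation from a fresh mask equals the one-pass scan
lemma pv_main_B (needs : PySem.Set String) : ∀ (n : Nat) (args : List String), args.length ≤ n →
    pvG args (pvConsumed needs args false) = pvScanB needs args := by
  intro n
  induction n with
  | zero =>
    intro args h
    have : args = [] := List.eq_nil_of_length_eq_zero (Nat.le_zero.mp h)
    subst this; simp [pvG_nil, pvScanB]
  | succ n ih =>
    intro args h
    cases args with
    | nil => simp [pvG_nil, pvScanB]
    | cons t rest =>
      rw [pvConsumed]
      by_cases hdd : t = "--"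
      · subst hdd
        rw [pvG_cons_sep _ _ _ _ (by decide), pvScanB]
        simp
      · have hpred : (t == "--" && !false) = false := by
          simp [hdd]
        by_cases htv : pvTakesValue needs t = true
        · have h3 := htv
          simp only [pvTakesValue, Bool.and_eq_true] at h3
          obtain ⟨⟨hfl, hni⟩, hc⟩ := h3
          have hni' : PySem.Chars.isIn ['='] t.toList = false := by
            have h4 : PySem.Str.isIn "=" t = false := by
              cases hx : PySem.Str.isIn "=" t
              · rfl
              · rw [hx] at hni; exact absurd hni (by decide)
            rw [PySem.Str.isIn_eq] at h4; exact h4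
          have hc' : t ∈ needs := by rwa [← PySem.Set.contains_iff]
          rw [htv]
          simp only [Bool.not_false, Bool.and_true]
          cases rest with
          | nil =>
            rw [pvG_cons _ _ _ _ hpred]
            simp [hfl, hdd, hni', hc', pvG_nil, pvScanB]
          | cons u rest' =>
            rw [pvConsumed, pvG_cons _ _ _ _ hpred,
                pvG_cons _ _ _ _ (by simp : (u == "--" && !true) = false)]
            rw [pvScanB]
            simp [hdd, hfl, hni', hc', ih rest' (by simp at h; omega)]
        · have htv' : pvTakesValue needs t = false := by
            cases hx : pvTakesValue needs t
            · rfl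
            · exact absurd hx htv
          rw [htv']
          simp only [Bool.false_and]
          rw [pvG_cons _ _ _ _ hpred, ih rest (by simp at h; omega)]
          by_cases hfl : pvFlaglike t = true
          · by_cases hni : PySem.Str.isIn "=" t = false
            · have hni' : PySem.Chars.isIn ['='] t.toList = false := by
                rw [PySem.Str.isIn_eq] at hni; exact hni
              have hcf : t ∉ needs := by
                intro hmem
                apply htv
                simp only [pvTakesValue, hfl, Bool.true_and]
                simp
                exact ⟨hni', hmem⟩
              rw [pvScanB]
              simp [hdd, hfl, hni', hcf]
            · have hnit : PySem.Str.isIn "=" t = true := by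
                cases hx : PySem.Str.isIn "=" t
                · exact absurd hx hni
                · rfl
              have hni' : PySem.Chars.isIn ['='] t.toList = true := by
                rw [PySem.Str.isIn_eq] at hnit; exact hnit
              rw [pvScanB]
              simp [hdd, hfl, hni']
          · have hfl' : pvFlaglike t = false := by
              cases hx : pvFlaglike t
              · rfl
              · exact absurd hx hfl
            rw [pvScanB]
            simp [hdd, hfl']

-- ===== VERDICT (by name: the statement is the Claim_ definition above) =====
theorem collect_positionals_py_spec : Claim_equal_collect_positionals_py := by
  intro args flags _
  unfold Spec_collect_positionals_py collect_positionals_py collect_positionals_py_alt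
  have hA := pv_main_A (PySem.Set.ofList flags) args.length args le_rfl []
  have hB := pv_main_B (PySem.Set.ofList flags) args.length args le_rfl
  simp only [List.nil_append] at hA
  rw [hA, ← hB]
  rfl
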